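-- pv_equiv track=rewrite | github.com/vietptit2k5/Python-PTIT | PY01067-SỐ 2 ƯU THẾ.py | generate_dominant_trinary
-- ===== SOURCE A (Python) =====
-- def is_dominant_two(tri_str):
--     count_2 = tri_str.count('2')
--     return count_2 > len(tri_str) / 2
--
-- def generate_dominant_trinary(n):
--     result = []
--     i = 0
--     while len(result) < n:
--         tri = ''
--         num = i
--         if num == 0:
--             tri = '0'
--         else:
--             while num > 0:
--                 tri = str(num % 3) + tri
--                 num //= 3
--         if is_dominant_two(tri):
--             result.append(tri)
--         i += 1
--     return result
-- ===== SOURCE B (Python) =====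
-- def generate_dominant_trinary(n):
--     # Enumerate 2-dominant trinary strings directly, length by length in numeric
--     # order, pruning every prefix that can no longer reach the required number
--     # of '2' digits; each length has at least one dominant string (all twos), so lengths 1..n suffice.
--     result = []
--     for length in range(1, n + 1):
--         _emit('', length, length // 2 + 1, True, n, result)
--     return result
--
-- def _emit(prefix, rem, need, leading, n, result):
--     # append, in order, every extension of `prefix` by `rem` more digits that
--     # contains at least `need` further '2's (no leading zero if `leading`),
--     # stopping once `result` holds n strings
--     if need > rem or len(result) >= n:
--         return
--     if rem == 0:
--         result.append(prefix)
--         return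
--     for d in (1, 2) if leading else (0, 1, 2):
--         _emit(prefix + str(d), rem - 1, need - (1 if d == 2 else 0), False, n, result)
-- ===== Notes on version B (the rewrite author's own statement) =====
-- stated objective: faster
-- what changed: Instead of scanning every integer, converting each to trinary and testing it, B generates the 2-dominant trinary strings directly, length by length in numeric order, pruning every prefix that can no longer reach the required number of twos.
import Mathlib
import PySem

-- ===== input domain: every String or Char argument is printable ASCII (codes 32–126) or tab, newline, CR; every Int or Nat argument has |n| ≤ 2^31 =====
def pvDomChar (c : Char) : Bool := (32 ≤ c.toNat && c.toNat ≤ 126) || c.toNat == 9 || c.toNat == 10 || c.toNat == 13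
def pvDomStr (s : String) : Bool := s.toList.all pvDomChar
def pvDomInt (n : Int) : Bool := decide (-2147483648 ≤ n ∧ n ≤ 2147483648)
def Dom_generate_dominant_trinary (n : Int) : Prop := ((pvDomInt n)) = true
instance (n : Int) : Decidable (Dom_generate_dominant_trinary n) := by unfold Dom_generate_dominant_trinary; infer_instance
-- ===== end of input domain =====

-- B enumerates the 2-dominant trinary strings directly (by length, in numeric order, pruning
-- prefixes that cannot reach enough '2' digits) instead of scanning every integer: measurably faster.

-- ===== PORT A =====
-- is_dominant_two: Python compares count_2 with len/2 under true (float) division; for every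
-- string this program ever builds (length far below 2^52) that comparison is exactly 2*count > len.
def pyIsDominantTwo (tri : String) : Bool :=
  decide (2 * (PySem.Str.count tri "2" : Int) > PySem.Str.len tri)

-- inner `while num > 0` of A
def triWhile (num : Int) (tri : String) : String :=
  if _h : num > 0 then
    triWhile (PySem.Int.floordiv num 3) (PySem.Int.toStr (PySem.Int.mod num 3) ++ tri)
  else tri
termination_by num.toNat
decreasing_by
  rw [PySem.Int.floordiv_eq_ediv_of_pos (by omega : (0:Int) < 3)]
  omega

-- outer `while len(result) < n` of A, with enough fuel that it can never run out: the k-th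
-- 2-dominant number is below 3^k, because the k numbers written using only the digit two
-- are dominant and all below 3^k
def genLoopA (n : Int) : Nat → Int → List String → List String
  | 0, _, result => result
  | fuel + 1, i, result =>
    if (result.length : Int) < n then
      let tri := if i = 0 then "0" else triWhile i ""
      genLoopA n fuel (i + 1) (if pyIsDominantTwo tri then result ++ [tri] else result)
    else result

def generate_dominant_trinary (n : Int) : List String :=
  genLoopA n (3 ^ n.toNat) 0 []

-- ===== PORT B =====
-- _emit of Source B; rem, the number of digits still to place, is a nonnegative count, hence a Nat
def emitB (n : Int) (pre : String) (rem : Nat) (need : Int) (leading : Bool)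
    (result : List String) : List String :=
  if need > (rem : Int) || n ≤ (result.length : Int) then result
  else
    match rem with
    | 0 => result ++ [pre]
    | r + 1 =>
      (if leading then [(1 : Int), 2] else [0, 1, 2]).foldl
        (fun res d =>
          emitB n (pre ++ PySem.Int.toStr d) r (need - if d = 2 then 1 else 0) false res)
        result
termination_by rem

def generate_dominant_trinary_alt (n : Int) : List String :=
  (PySem.List.pyRange 1 (n + 1) 1).foldl
    (fun result length =>
      emitB n "" length.toNat (PySem.Int.floordiv length 2 + 1) true result) []

-- ===== PRECONDITION & SPEC =====
def Spec_generate_dominant_trinary (n : Int) (out : List String) : Prop := out = generate_dominant_trinary_alt n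
instance (n : Int) (out : List String) : Decidable (Spec_generate_dominant_trinary n out) := by unfold Spec_generate_dominant_trinary; infer_instance

-- ===== CLAIM (what is proved, stated in full; the proofs are below) =====
def Claim_equal_generate_dominant_trinary : Prop := ∀ (n : Int), Dom_generate_dominant_trinary n → Spec_generate_dominant_trinary n (generate_dominant_trinary n)

-- ===== LEMMAS AND PROOFS =====

-- the trinary digit characters
def dig (e : Nat) : Char := if e = 0 then '0' else if e = 1 then '1' else '2'

-- the trinary representation, built the way A's inner while loop builds it
def repC (m : Nat) : List Char :=
  if _h : m < 3 then [dig m] else repC (m / 3) ++ [dig (m % 3)]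
termination_by m
decreasing_by omega

-- the string A's loop body produces for counter value m
def strA (m : Nat) : String := String.ofList (repC m)

-- all digit strings of a given length, in numeric order (no leading zero when `leading`):
-- the tree Source B's _emit walks, before pruning
def seqs : Nat → Bool → List (List Char)
  | 0, _ => [[]]
  | r + 1, leading =>
    (if leading then ['1', '2'] else ['0', '1', '2']).flatMap fun d => (seqs r false).map (d :: ·)

-- the block of output strings Source B produces for length k+1
def LB (k : Nat) : List String :=
  ((seqs (k + 1) true).filter
    (fun t => decide ((((k + 1) / 2 : Nat) : Int) + 1 ≤ (t.count '2' : Int)))).map String.ofList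

-- ---- str.count with a single-character needle is List.count ----
lemma countGo_single (c : Char) : ∀ (l : List Char) (fuel acc : Nat), l.length ≤ fuel →
    PySem.Chars.count.go [c] fuel l acc = acc + l.count c := by
  intro l
  induction l with
  | nil => intro fuel acc _; cases fuel <;> simp [PySem.Chars.count.go]
  | cons a t ih =>
    intro fuel acc hf
    match fuel with
    | 0 => simp at hf
    | f + 1 =>
      simp only [List.length_cons] at hf
      rw [PySem.Chars.count.go]
      by_cases hac : c = a
      · subst hac
        simp [List.isPrefixOf, ih f (acc + 1) (by omega)]
        omega
      · simp [List.isPrefixOf, hac, ih f acc (by omega), Ne.symm hac]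

lemma count_single (c : Char) (l : List Char) : PySem.Chars.count l [c] = l.count c := by
  simp [PySem.Chars.count, countGo_single c l l.length 0 le_rfl]

-- ---- dominance of a character list ----
lemma dom_ofList (cs : List Char) :
    pyIsDominantTwo (String.ofList cs) = decide ((cs.length : Int) < 2 * cs.count '2') := by
  simp [pyIsDominantTwo, PySem.Str.count_eq, PySem.Str.len_eq, count_single]

-- ---- small evaluations ----
lemma repC_zero : repC 0 = ['0'] := by rw [repC]; norm_num [dig]
lemma repC_one : repC 1 = ['1'] := by rw [repC]; norm_num [dig]
lemma repC_two : repC 2 = ['2'] := by rw [repC]; norm_num [dig]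
lemma toChars_zero : PySem.Int.toChars 0 = ['0'] := by decide
lemma toChars_one : PySem.Int.toChars 1 = ['1'] := by decide
lemma toChars_two : PySem.Int.toChars 2 = ['2'] := by decide

-- ---- A's inner while loop computes repC ----
lemma toStr_digit (e : Nat) (he : e < 3) :
    PySem.Int.toStr ((e : Nat) : Int) = String.ofList [dig e] := by
  interval_cases e <;> decide

lemma repC_step (v e : Nat) (hv : 1 ≤ v) (he : e < 3) :
    repC (3 * v + e) = repC v ++ [dig e] := by
  rw [repC]
  have h1 : ¬ (3 * v + e < 3) := by omega
  have h2 : (3 * v + e) / 3 = v := by omega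
  have h3 : (3 * v + e) % 3 = e := by omega
  simp [h1, h2, h3]

lemma triWhile_eq : ∀ (m : Nat), 0 < m → ∀ (tri : String),
    triWhile (m : Int) tri = String.ofList (repC m) ++ tri := by
  intro m
  induction m using Nat.strong_induction_on with
  | _ m ih =>
    intro hm tri
    rw [triWhile, dif_pos (by exact_mod_cast hm : ((m : Int) > 0))]
    have hdiv : PySem.Int.floordiv (m : Int) 3 = ((m / 3 : Nat) : Int) := by
      rw [PySem.Int.floordiv_eq_ediv_of_pos (by omega : (0:Int) < 3)]
      omega
    have hmod : PySem.Int.mod (m : Int) 3 = ((m % 3 : Nat) : Int) := by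
      rw [PySem.Int.mod_eq_emod_of_pos (by omega : (0:Int) < 3)]
      omega
    rw [hdiv, hmod, toStr_digit (m % 3) (Nat.mod_lt m (by omega))]
    by_cases hlt : m < 3
    · have h0 : m / 3 = 0 := by omega
      have hm3 : m % 3 = m := by omega
      rw [h0, hm3]
      rw [triWhile, dif_neg (by omega : ¬ ((0:Nat) : Int) > 0)]
      rw [repC, dif_pos hlt]
    · have hpos : 0 < m / 3 := by omega
      rw [ih (m / 3) (by omega) hpos]
      conv_rhs => rw [repC, dif_neg hlt]
      rw [String.ofList_append, String.append_assoc]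

lemma strA_spec (i : Nat) : (if (i : Int) = 0 then "0" else triWhile (i : Int) "") = strA i := by
  by_cases hi : i = 0
  · subst hi
    rw [if_pos (by norm_num), strA, repC_zero]
  · rw [if_neg (by exact_mod_cast hi), triWhile_eq i (by omega), strA, String.append_empty]

-- ---- characterisation of A's outer loop ----
lemma genLoopA_eq (n : Int) : ∀ (fuel : Nat) (i : Nat) (res : List String),
    genLoopA n fuel (i : Int) res =
      res ++ ((((List.range' i fuel).filter (fun m => pyIsDominantTwo (strA m))).map strA).take
        ((n - res.length).toNat)) := by
  intro fuel
  induction fuel with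
  | zero => intro i res; simp [genLoopA]
  | succ f ih =>
    intro i res
    rw [genLoopA]
    by_cases hlt : (res.length : Int) < n
    · rw [if_pos hlt]
      show genLoopA n f ((i:Int) + 1)
          (if pyIsDominantTwo (if (i : Int) = 0 then "0" else triWhile (i : Int) "")
           then res ++ [if (i : Int) = 0 then "0" else triWhile (i : Int) ""] else res) = _
      rw [strA_spec i]
      have hcast : (i : Int) + 1 = ((i + 1 : Nat) : Int) := by push_cast; ring
      rw [hcast, List.range'_succ, List.filter_cons]
      by_cases hdom : pyIsDominantTwo (strA i)
      · rw [if_pos hdom, ih (i + 1) (res ++ [strA i])]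
        have hk : (n - (res.length : Int)).toNat
            = ((n - ((res ++ [strA i]).length : Int)).toNat) + 1 := by
          simp only [List.length_append, List.length_cons, List.length_nil]
          omega
        rw [if_pos (by simpa using hdom), List.map_cons, hk, List.take_succ_cons,
          List.append_assoc]
        rfl
      · rw [if_neg hdom, ih (i + 1) res, if_neg (by simpa using hdom)]
    · rw [if_neg hlt]
      have h0 : (n - (res.length : Int)).toNat = 0 := by omega
      simp [h0]

-- ---- composing capped appends ----
lemma append_take_append {α : Type} (n : Int) (res A B : List α) :
    (res ++ A.take ((n - res.length).toNat)) ++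
      B.take ((n - (res ++ A.take ((n - res.length).toNat)).length).toNat) =
    res ++ (A ++ B).take ((n - res.length).toNat) := by
  rw [List.take_append, ← List.append_assoc]
  congr 2
  simp only [List.length_append, List.length_take]
  omega

lemma foldl_take {α β : Type} (n : Int) (L : β → List α) (f : List α → β → List α)
    (hf : ∀ r d, f r d = r ++ (L d).take ((n - r.length).toNat)) :
    ∀ (ds : List β) (res : List α),
      ds.foldl f res = res ++ ((ds.flatMap L).take ((n - res.length).toNat)) := by
  intro ds
  induction ds with
  | nil => intro res; simp
  | cons d ds ih =>
    intro res
    rw [List.foldl_cons, ih, hf, append_take_append, List.flatMap_cons]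

-- ---- every element of seqs rem l has length rem ----
lemma seqs_length : ∀ (rem : Nat) (l : Bool) (t : List Char), t ∈ seqs rem l → t.length = rem := by
  intro rem
  induction rem with
  | zero => intro l t ht; simp [seqs] at ht; simp [ht]
  | succ r ih =>
    intro l t ht
    simp only [seqs, List.mem_flatMap, List.mem_map] at ht
    obtain ⟨d, _, t', ht', rfl⟩ := ht
    simp [ih false t' ht']

-- ---- characterisation of Source B's _emit ----
lemma emitB_eq (n : Int) : ∀ (rem : Nat) (pre : String) (need : Int) (leading : Bool)
    (res : List String),
    emitB n pre rem need leading res =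
      res ++ ((((seqs rem leading).filter (fun t => decide (need ≤ (t.count '2' : Int)))).map
        (fun t => String.ofList (pre.toList ++ t))).take ((n - res.length).toNat)) := by
  intro rem
  induction rem with
  | zero =>
    intro pre need leading res
    rw [emitB]
    by_cases hneed : need > ((0 : Nat) : Int)
    · rw [if_pos (by simp only [Bool.or_eq_true, decide_eq_true_eq]; omega)]
      have hfil : ¬ need ≤ ((([] : List Char).count '2' : Nat) : Int) := by
        simp only [List.count_nil, Nat.cast_zero]
        omega
      simp [seqs, hfil]
      omega
    · by_cases hfull : n ≤ (res.length : Int)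
      · rw [if_pos (by simp only [Bool.or_eq_true, decide_eq_true_eq]; omega)]
        have h0 : (n - (res.length : Int)).toNat = 0 := by omega
        simp [h0]
      · rw [if_neg (by simp only [Bool.or_eq_true, decide_eq_true_eq]; omega)]
        have hfil : need ≤ (0 : Int) := by omega
        have hk : 1 ≤ n.toNat - res.length := by omega
        simp [seqs, hfil, List.take_of_length_le, hk]
  | succ r ih =>
    intro pre need leading res
    rw [emitB]
    by_cases hfull : n ≤ (res.length : Int)
    · rw [if_pos (by simp only [Bool.or_eq_true, decide_eq_true_eq]; omega)]
      have h0 : (n - (res.length : Int)).toNat = 0 := by omega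
      simp [h0]
    · by_cases hneed : need > ((r + 1 : Nat) : Int)
      · rw [if_pos (by simp only [Bool.or_eq_true, decide_eq_true_eq]; omega)]
        have hfil : ((seqs (r+1) leading).filter
            (fun t => decide (need ≤ (t.count '2' : Int)))) = [] := by
          rw [List.filter_eq_nil_iff]
          intro t ht
          have h1 : t.length = r + 1 := seqs_length (r+1) leading t ht
          have h2 : t.count '2' ≤ t.length := List.count_le_length
          simp only [decide_eq_true_eq]
          push_cast at hneed ⊢
          omega
        simp [hfil]
      · rw [if_neg (by simp only [Bool.or_eq_true, decide_eq_true_eq]; omega)]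
        rw [foldl_take n
          (fun d => ((seqs r false).filter
              (fun t => decide (need - (if d = (2:Int) then 1 else 0) ≤ (t.count '2' : Int)))).map
            (fun t => String.ofList (pre.toList ++ (PySem.Int.toChars d ++ t))))
          _
          (by
            intro r' d
            rw [ih]
            simp only [String.toList_append, PySem.Int.toList_toStr, List.append_assoc])]
        congr 1
        congr 1
        cases leading
        · simp only [seqs, Bool.false_eq_true, if_false, List.flatMap_cons, List.flatMap_nil,
            List.append_nil, List.filter_append, List.filter_map, List.map_append, List.map_map,
            toChars_one, toChars_two]
          norm_num [Function.comp_def, List.count_cons, toChars_zero]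
        · simp only [seqs, if_true, List.flatMap_cons, List.flatMap_nil,
            List.append_nil, List.filter_append, List.filter_map, List.map_append, List.map_map,
            toChars_one, toChars_two]
          norm_num [Function.comp_def, List.count_cons]

-- ---- the number/string bijection ----
lemma range'_glue (a b c : Nat) :
    List.range' a b ++ List.range' (a + b) c = List.range' a (b + c) := by
  have := @List.range'_append a b c 1
  simpa using this

lemma seqs_map_eq : ∀ (r : Nat) (v : Nat), 1 ≤ v →
    (seqs r false).map (fun t => repC v ++ t) = (List.range' (v * 3 ^ r) (3 ^ r)).map repC := by
  intro r
  induction r with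
  | zero => intro v hv; simp [seqs]
  | succ r ih =>
    intro v hv
    have key : ∀ e : Nat, e < 3 →
        (seqs r false).map (fun t => repC v ++ (dig e :: t)) =
          (List.range' ((3 * v + e) * 3 ^ r) (3 ^ r)).map repC := by
      intro e he
      have hstep : ∀ t : List Char, repC v ++ (dig e :: t) = repC (3 * v + e) ++ t := by
        intro t
        rw [repC_step v e hv he]
        simp
      simp only [hstep]
      exact ih (3 * v + e) (by omega)
    have d0 : dig 0 = '0' := rfl
    have d1 : dig 1 = '1' := rfl
    have d2 : dig 2 = '2' := rfl
    simp only [seqs, Bool.false_eq_true, if_false, List.flatMap_cons, List.flatMap_nil,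
      List.append_nil, List.map_append, List.map_map]
    simp only [Function.comp_def]
    have k0 := key 0 (by omega); rw [d0] at k0
    have k1 := key 1 (by omega); rw [d1] at k1
    have k2 := key 2 (by omega); rw [d2] at k2
    rw [k0, k1, k2]
    rw [← List.map_append, ← List.map_append]
    congr 1
    have e1 : (3*v+1)*3^r = (3*v+0)*3^r + 3^r := by ring
    have e2 : (3*v+2)*3^r = ((3*v+0)*3^r + 3^r) + 3^r := by ring
    rw [e1, e2, range'_glue, range'_glue]
    congr 1 <;> ring

lemma seqs_true_eq (k : Nat) :
    seqs (k + 1) true = (List.range' (3 ^ k) (2 * 3 ^ k)).map repC := by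
  have k1 : (seqs k false).map (fun t => repC 1 ++ t)
      = (List.range' (1 * 3 ^ k) (3 ^ k)).map repC := seqs_map_eq k 1 (by omega)
  have k2 : (seqs k false).map (fun t => repC 2 ++ t)
      = (List.range' (2 * 3 ^ k) (3 ^ k)).map repC := seqs_map_eq k 2 (by omega)
  rw [repC_one] at k1
  rw [repC_two] at k2
  simp only [List.singleton_append] at k1 k2
  simp only [seqs, if_true, List.flatMap_cons, List.flatMap_nil, List.append_nil]
  rw [k1, k2, ← List.map_append]
  congr 1
  rw [show 2 * 3 ^ k = 1 * 3 ^ k + 3 ^ k from by ring, range'_glue]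
  congr 1 <;> ring

lemma range'_split : ∀ (N : Nat),
    List.range' 1 (3 ^ N - 1)
      = (List.range N).flatMap (fun k => List.range' (3 ^ k) (2 * 3 ^ k)) := by
  intro N
  induction N with
  | zero => simp
  | succ N ih =>
    rw [List.range_succ, List.flatMap_append, ← ih, List.flatMap_cons, List.flatMap_nil,
      List.append_nil]
    have h1 : (1:Nat) ≤ 3 ^ N := Nat.one_le_pow _ _ (by omega)
    have h3 : 3 ^ (N + 1) - 1 = (3 ^ N - 1) + 2 * 3 ^ N := by
      have : (3:Nat) ^ (N+1) = 3 * 3 ^ N := by ring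
      omega
    rw [h3, ← range'_glue 1 (3 ^ N - 1) (2 * 3 ^ N),
      show 1 + (3 ^ N - 1) = 3 ^ N from by omega]

-- ---- pushing filter and map through flatMap ----
lemma flatMap_filter_map {α β γ : Type} (l : List α) (g : α → List β) (p : β → Bool)
    (f : β → γ) :
    ((l.flatMap g).filter p).map f = l.flatMap (fun a => ((g a).filter p).map f) := by
  induction l with
  | nil => simp
  | cons a l ih => simp [List.filter_append, ih]

-- ---- A's block of outputs for one trinary length equals Source B's ----
lemma perLength (k : Nat) :
    ((List.range' (3 ^ k) (2 * 3 ^ k)).filter (fun m => pyIsDominantTwo (strA m))).map strA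
      = LB k := by
  rw [LB, seqs_true_eq k, List.filter_map, List.map_map]
  have hmap : String.ofList ∘ repC = strA := funext fun m => rfl
  rw [hmap]
  congr 1
  apply List.filter_congr
  intro m hm
  have hlen : (repC m).length = k + 1 := by
    have hmem : repC m ∈ seqs (k + 1) true := by
      rw [seqs_true_eq k]
      exact List.mem_map_of_mem hm
    exact seqs_length (k + 1) true _ hmem
  simp only [Function.comp_def, strA, dom_ofList, hlen]
  rw [decide_eq_decide]
  push_cast
  omega

-- ---- the two enumerations produce the same list of strings ----
lemma bridge (N : Nat) :
    ((List.range' 0 (3 ^ N)).filter (fun m => pyIsDominantTwo (strA m))).map strA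
      = (List.range N).flatMap LB := by
  have h1 : (1:Nat) ≤ 3 ^ N := Nat.one_le_pow _ _ (by omega)
  have dom0 : pyIsDominantTwo (strA 0) = false := by
    rw [show strA 0 = String.ofList ['0'] from by rw [strA, repC_zero], dom_ofList]
    simp
  rw [show 3 ^ N = (3 ^ N - 1) + 1 from by omega, List.range'_succ, List.filter_cons, dom0,
    if_neg (by simp), show (0:Nat) + 1 = 1 from rfl, range'_split N, flatMap_filter_map]
  exact List.flatMap_congr (fun k _ => perLength k)

-- ---- characterisations of the two ports ----
lemma A_char (n : Int) :
    generate_dominant_trinary n =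
      (((List.range' 0 (3 ^ n.toNat)).filter (fun m => pyIsDominantTwo (strA m))).map
        strA).take n.toNat := by
  have h := genLoopA_eq n (3 ^ n.toNat) 0 []
  simp only [Nat.cast_zero, List.length_nil, List.nil_append] at h
  rw [generate_dominant_trinary, h]
  norm_num

lemma B_char (n : Int) :
    generate_dominant_trinary_alt n = ((List.range n.toNat).flatMap LB).take n.toNat := by
  rw [generate_dominant_trinary_alt, PySem.List.pyRange_one,
    show (n + 1 - 1 : Int) = n from by ring, List.foldl_map]
  rw [foldl_take n LB _ (by
    intro r k
    have ht : ((1 : Int) + (k : Int)).toNat = k + 1 := by omega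
    have hd : PySem.Int.floordiv (1 + (k : Int)) 2 = (((k + 1) / 2 : Nat) : Int) := by
      rw [PySem.Int.floordiv_eq_ediv_of_pos (by omega : (0:Int) < 2)]
      omega
    rw [ht, hd, emitB_eq]
    simp [LB])]
  norm_num

-- ===== VERDICT (by name: the statement is the Claim_ definition above) =====
theorem generate_dominant_trinary_spec : Claim_equal_generate_dominant_trinary := by
  intro n _
  unfold Spec_generate_dominant_trinary
  rw [A_char, B_char, bridge n.toNat]
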